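-- pv_equiv track=rewrite | github.com/PiotrGrzybowski/ProbabilisticMachineLearning | Lab10/graph_utils.py | get_segments_from_path
-- ===== SOURCE A (Python) =====
-- from itertools import islice
--
-- def get_segments_from_path(path):
--     it = iter(path)
--     result = tuple(islice(it, 3))
--     if len(result) == 3:
--         yield result
--     for elem in it:
--         result = result[1:] + (elem,)
--         yield result
-- ===== SOURCE B (Python) =====
-- def get_segments_from_path(path):
--     seq = list(path)
--     yield from zip(seq, seq[1:], seq[2:])
-- ===== Notes on version B (the rewrite author's own statement) =====
-- stated objective: idiomatic
-- what changed: Replaced A's stateful sliding-window generator (islice priming plus per-element tuple slice-and-append) with a stateless zip of the list against its two shifted slices, zip(seq, seq[1:], seq[2:]); the per-element Python-level tuple construction disappears into C-level zip iteration.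
import Mathlib
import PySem

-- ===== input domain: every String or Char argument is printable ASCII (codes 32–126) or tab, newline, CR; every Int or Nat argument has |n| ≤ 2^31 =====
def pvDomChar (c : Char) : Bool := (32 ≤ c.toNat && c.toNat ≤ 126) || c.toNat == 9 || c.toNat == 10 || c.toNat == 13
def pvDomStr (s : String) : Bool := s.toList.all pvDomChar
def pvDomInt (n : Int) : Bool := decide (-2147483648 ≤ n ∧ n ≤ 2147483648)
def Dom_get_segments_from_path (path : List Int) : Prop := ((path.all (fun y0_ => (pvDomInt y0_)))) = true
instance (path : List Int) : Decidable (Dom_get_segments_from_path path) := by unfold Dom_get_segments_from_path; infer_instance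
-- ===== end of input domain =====

-- B replaces A's stateful sliding-window generator with a stateless zip of the
-- list against its two shifted slices (same return value, collected to a list).

-- ===== PORT A =====
-- the 'for elem in it' loop: result = result[1:] + (elem,); yield result
def pvSegLoopA : (Int × Int × Int) → List Int → List (Int × Int × Int)
  | _, [] => []
  | st, e :: rest =>
      let st' : Int × Int × Int := (st.2.1, st.2.2, e)
      st' :: pvSegLoopA st' rest

def get_segments_from_path (path : List Int) : List (Int × Int × Int) :=
  -- result = tuple(islice(it, 3)); if len(result) == 3: yield result; then the loop
  match path with
  | a :: b :: c :: rest => (a, b, c) :: pvSegLoopA (a, b, c) rest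
  | _ => []

-- ===== PORT B =====
-- seq = list(path); yield from zip(seq, seq[1:], seq[2:])
def get_segments_from_path_alt (path : List Int) : List (Int × Int × Int) :=
  List.zip path (List.zip (PySem.List.slice path (some 1) none) (PySem.List.slice path (some 2) none))

-- ===== PRECONDITION & SPEC =====
def Spec_get_segments_from_path (path : List Int) (out : List (Int × Int × Int)) : Prop := out = get_segments_from_path_alt path
instance (path : List Int) (out : List (Int × Int × Int)) : Decidable (Spec_get_segments_from_path path out) := by unfold Spec_get_segments_from_path; infer_instance

-- ===== CLAIM (what is proved, stated in full; the proofs are below) =====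
def Claim_equal_get_segments_from_path : Prop := ∀ (path : List Int), Dom_get_segments_from_path path → Spec_get_segments_from_path path (get_segments_from_path path)

-- ===== LEMMAS AND PROOFS =====

-- ===== VERDICT (by name: the statement is the Claim_ definition above) =====
-- A's cons-and-slide output is the three-way zip of the list with its tails
theorem segLoopA_eq_zip (rest : List Int) : ∀ (a b c : Int),
    (a, b, c) :: pvSegLoopA (a, b, c) rest
      = List.zip (a :: b :: c :: rest) (List.zip (b :: c :: rest) (c :: rest)) := by
  induction rest with
  | nil => intro a b c; rfl
  | cons e rest ih =>
      intro a b c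
      simpa [pvSegLoopA, List.zip] using congrArg (List.cons (a, b, c)) (ih b c e)

-- ===== VERDICT (by name: the statement is the Claim_ definition above) =====
theorem get_segments_from_path_spec : Claim_equal_get_segments_from_path := by
  intro path _
  show get_segments_from_path path = get_segments_from_path_alt path
  cases path with
  | nil => rfl
  | cons a t =>
    cases t with
    | nil => rfl
    | cons b t =>
      cases t with
      | nil => rfl
      | cons c rest =>
        have h1 : PySem.List.slice (a :: b :: c :: rest) (some 1) none = b :: c :: rest := by
          simp [PySem.List.slice_from_one]
        have h2 : PySem.List.slice (a :: b :: c :: rest) (some 2) none = c :: rest := by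
          simpa using PySem.List.slice_from_natCast (a :: b :: c :: rest) 2
        rw [get_segments_from_path_alt, h1, h2]
        exact segLoopA_eq_zip rest a b c
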